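-- pv_equiv track=rewrite | github.com/nathanelms/Database-whisperer | database_whisper/router.py | _remaining_ambiguity_pairs
-- ===== SOURCE A (Python) =====
-- from typing import Any, Dict, List, Optional
-- from collections import defaultdict
--
-- def _remaining_ambiguity_pairs(neighborhoods, selected_fields):
--     total = 0
--     for neighborhood in neighborhoods:
--         buckets: Dict[tuple, int] = defaultdict(int)
--         for record in neighborhood:
--             key = tuple(record.get(f, "") for f in selected_fields) if selected_fields else ("_",)
--             buckets[key] += 1
--         for count in buckets.values():
--             if count > 1:
--                 total += count * (count - 1) // 2
--     return total
-- ===== SOURCE B (Python) =====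
-- def _remaining_ambiguity_pairs(neighborhoods, selected_fields):
--     total = 0
--     for neighborhood in neighborhoods:
--         buckets = {}
--         for record in neighborhood:
--             key = tuple(record.get(f, "") for f in selected_fields) if selected_fields else ("_",)
--             seen = buckets.get(key, 0)
--             total += seen
--             buckets[key] = seen + 1
--     return total
-- ===== Notes on version B (the rewrite author's own statement) =====
-- stated objective: simpler
-- what changed: Counts pairs online: each record adds the number of previously seen records with the same key, removing the second pass over bucket values and the count*(count-1)//2 closed form.
import Mathlib
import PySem

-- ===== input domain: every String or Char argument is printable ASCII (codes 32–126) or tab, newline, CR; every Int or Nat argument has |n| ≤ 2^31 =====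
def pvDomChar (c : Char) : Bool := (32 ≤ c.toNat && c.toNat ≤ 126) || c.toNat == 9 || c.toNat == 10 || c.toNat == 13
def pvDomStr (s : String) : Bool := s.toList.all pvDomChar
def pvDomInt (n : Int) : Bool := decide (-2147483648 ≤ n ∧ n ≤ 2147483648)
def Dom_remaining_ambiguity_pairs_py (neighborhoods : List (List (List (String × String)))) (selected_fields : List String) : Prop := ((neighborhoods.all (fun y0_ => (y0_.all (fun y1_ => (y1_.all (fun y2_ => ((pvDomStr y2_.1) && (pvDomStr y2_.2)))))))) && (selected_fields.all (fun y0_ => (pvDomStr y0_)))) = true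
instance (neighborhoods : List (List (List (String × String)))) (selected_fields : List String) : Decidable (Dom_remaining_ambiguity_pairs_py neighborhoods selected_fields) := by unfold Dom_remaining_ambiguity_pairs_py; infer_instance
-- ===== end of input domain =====

-- B counts pairs online (each record adds the number of earlier records with the same key),
-- dropping A's second pass over bucket values and its count*(count-1)//2 closed form (objective: simpler).

-- key = tuple(record.get(f, "") for f in selected_fields) if selected_fields else ("_",)
-- (shared by both Pythons verbatim, so shared here)
def pvKey (record : List (String × String)) (selected_fields : List String) : List String :=
  if selected_fields.isEmpty then ["_"]
  else selected_fields.map (fun f => (PySem.Dict.mk record).getD f "")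

-- ===== PORT A =====
def remaining_ambiguity_pairs_py (neighborhoods : List (List (List (String × String)))) (selected_fields : List String) : Int :=
  neighborhoods.foldl (fun total neighborhood =>
    let buckets : PySem.Dict (List String) Int :=
      neighborhood.foldl (fun d record => d.modify (pvKey record selected_fields) 0 (· + 1)) PySem.Dict.empty
    buckets.values.foldl (fun t c => if c > 1 then t + PySem.Int.floordiv (c * (c - 1)) 2 else t) total) 0

-- ===== PORT B =====
def remaining_ambiguity_pairs_py_alt (neighborhoods : List (List (List (String × String)))) (selected_fields : List String) : Int :=
  neighborhoods.foldl (fun total neighborhood =>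
    (neighborhood.foldl (fun (st : PySem.Dict (List String) Int × Int) record =>
      let key := pvKey record selected_fields
      let seen := st.1.getD key 0
      (st.1.insert key (seen + 1), st.2 + seen)) (PySem.Dict.empty, total)).2) 0

-- ===== PRECONDITION & SPEC =====
def Spec_remaining_ambiguity_pairs_py (neighborhoods : List (List (List (String × String)))) (selected_fields : List String) (out : Int) : Prop := out = remaining_ambiguity_pairs_py_alt neighborhoods selected_fields
instance (neighborhoods : List (List (List (String × String)))) (selected_fields : List String) (out : Int) : Decidable (Spec_remaining_ambiguity_pairs_py neighborhoods selected_fields out) := by unfold Spec_remaining_ambiguity_pairs_py; infer_instance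

-- ===== CLAIM (what is proved, stated in full; the proofs are below) =====
def Claim_equal_remaining_ambiguity_pairs_py : Prop := ∀ (neighborhoods : List (List (List (String × String)))) (selected_fields : List String), Dom_remaining_ambiguity_pairs_py neighborhoods selected_fields → Spec_remaining_ambiguity_pairs_py neighborhoods selected_fields (remaining_ambiguity_pairs_py neighborhoods selected_fields)

-- ===== LEMMAS AND PROOFS =====

-- g c = contribution of a bucket of size c in A
def pvG (c : Int) : Int := if c > 1 then PySem.Int.floordiv (c * (c - 1)) 2 else 0

-- per-neighborhood value both sides compute
def pvAval (ks : List (List String)) : Int :=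
  ((PySem.Set.ofList ks).map (fun x => pvG (ks.count x : Int))).sum

lemma pvG_succ (c : Int) (hc : 0 ≤ c) : pvG (c + 1) = pvG c + c := by
  unfold pvG
  rcases lt_trichotomy c 1 with h | h | h
  · have h0 : c = 0 := le_antisymm (by omega) hc
    subst h0; norm_num
  · subst h; decide
  · rw [if_pos (by omega), if_pos (by omega)]
    rw [PySem.Int.floordiv_eq_ediv_of_pos (by norm_num), PySem.Int.floordiv_eq_ediv_of_pos (by norm_num)]
    have : (c + 1) * (c + 1 - 1) = c * (c - 1) + c * 2 := by ring
    rw [this, Int.add_mul_ediv_right _ _ (by norm_num)]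

lemma sum_map_single_diff {κ : Type} [DecidableEq κ] (f h : κ → Int) (k : κ) :
    ∀ (s : List κ), s.Nodup → k ∈ s → (∀ x ∈ s, x ≠ k → f x = h x) →
    (s.map f).sum = (s.map h).sum + (f k - h k) := by
  intro s
  induction s with
  | nil => intro _ hk; exact absurd hk (List.not_mem_nil)
  | cons a t ih =>
    intro hnd hk hfh
    rcases List.mem_cons.mp hk with rfl | hkt
    · have : ∀ x ∈ t, f x = h x := by
        intro x hx
        exact hfh x (List.mem_cons_of_mem _ hx) (fun hxk => (List.nodup_cons.mp hnd).1 (hxk ▸ hx))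
      simp only [List.map_cons, List.sum_cons]
      rw [List.map_congr_left this]
      ring
    · have ha : a ≠ k := fun h' => (List.nodup_cons.mp hnd).1 (h' ▸ hkt)
      simp only [List.map_cons, List.sum_cons]
      rw [ih (List.nodup_cons.mp hnd).2 hkt (fun x hx => hfh x (List.mem_cons_of_mem _ hx)),
          hfh a (List.mem_cons_self) ha]
      ring

lemma pvAval_snoc (ks : List (List String)) (k : List String) :
    pvAval (ks ++ [k]) = pvAval ks + (ks.count k : Int) := by
  unfold pvAval
  have hof : PySem.Set.ofList (ks ++ [k]) = PySem.Set.add (PySem.Set.ofList ks) k :=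
    PySem.Set.ofList_append_singleton ks k
  by_cases hk : k ∈ ks
  · have hadd : PySem.Set.add (PySem.Set.ofList ks) k = PySem.Set.ofList ks :=
      PySem.Set.add_of_mem ((PySem.Set.mem_ofList ..).mpr hk)
    rw [hof, hadd]
    have := sum_map_single_diff
      (fun x => pvG ((ks ++ [k]).count x : Int)) (fun x => pvG ((ks.count x : Int))) k
      (PySem.Set.ofList ks) (PySem.Set.nodup_ofList ks)
      ((PySem.Set.mem_ofList ..).mpr hk)
      (by
        intro x hx hxk
        have : (ks ++ [k]).count x = ks.count x := by
          simp [List.count_append, Ne.symm hxk]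
        simp [this])
    rw [this]
    beta_reduce
    have hcnt : ((ks ++ [k]).count k : Int) = (ks.count k : Int) + 1 := by
      simp [List.count_append]
    rw [hcnt, pvG_succ _ (by positivity)]
    ring
  · have hadd : PySem.Set.add (PySem.Set.ofList ks) k = PySem.Set.ofList ks ++ [k] :=
      PySem.Set.add_of_not_mem (fun h => hk ((PySem.Set.mem_ofList ..).mp h))
    rw [hof, hadd, List.map_append, List.sum_append]
    have h1 : ∀ x ∈ PySem.Set.ofList ks,
        pvG (((ks ++ [k]).count x : Int)) = pvG ((ks.count x : Int)) := by
      intro x hx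
      have hxk : x ≠ k := fun h' => hk (h' ▸ (PySem.Set.mem_ofList ..).mp hx)
      have : (ks ++ [k]).count x = ks.count x := by
        simp [List.count_append, Ne.symm hxk]
      simp [this]
    rw [List.map_congr_left h1]
    have hck : ks.count k = 0 := List.count_eq_zero_of_not_mem hk
    have hck2 : (ks ++ [k]).count k = 1 := by simp [List.count_append, hck]
    simp [hck, pvG]

-- A's inner two loops over a neighborhood compute total + pvAval of the key list
lemma pvA_inner (ks : List (List String)) (t : Int) :
    ((ks.foldl (fun d x => d.modify x 0 (· + 1)) PySem.Dict.empty).values).foldl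
      (fun t c => if c > 1 then t + PySem.Int.floordiv (c * (c - 1)) 2 else t) t
    = t + pvAval ks := by
  rw [← PySem.Dict.counter_eq_foldl]
  have hv : (PySem.Dict.counter ks).values
      = (PySem.Set.ofList ks).map (fun x => (ks.count x : Int)) := by
    have := PySem.Dict.items_counter (xs := ks)
    calc (PySem.Dict.counter ks).values
        = (PySem.Dict.counter ks).items.map (·.2) := rfl
      _ = ((PySem.Set.ofList ks).map (fun x => (x, (ks.count x : Int)))).map (·.2) := by rw [this]
      _ = (PySem.Set.ofList ks).map (fun x => (ks.count x : Int)) := by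
          rw [List.map_map]; rfl
  rw [hv]
  have := PySem.List.foldl_add (l := (PySem.Set.ofList ks).map (fun x => (ks.count x : Int)))
    (g := pvG) (a := t)
  have hstep : ((PySem.Set.ofList ks).map (fun x => (ks.count x : Int))).foldl
      (fun t c => if c > 1 then t + PySem.Int.floordiv (c * (c - 1)) 2 else t) t
      = ((PySem.Set.ofList ks).map (fun x => (ks.count x : Int))).foldl
      (fun t c => t + pvG c) t := by
    apply PySem.List.foldl_congr_mem
    intro acc x _
    unfold pvG
    split <;> simp_all
  rw [hstep, this, List.map_map]
  rfl

-- the dict component of B's inner fold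
lemma pvB_dict (ks : List (List String)) :
    ∀ (d : PySem.Dict (List String) Int) (t : Int),
    (ks.foldl (fun (st : PySem.Dict (List String) Int × Int) x =>
      (st.1.insert x (st.1.getD x 0 + 1), st.2 + st.1.getD x 0)) (d, t)).1
    = ks.foldl (fun d x => d.insert x (d.getD x 0 + 1)) d := by
  induction ks with
  | nil => intro d t; rfl
  | cons a t ih => intro d t0; simp only [List.foldl_cons]; exact ih _ _

-- B's inner loop over a neighborhood computes total + pvAval of the key list
lemma pvB_inner (ks : List (List String)) (t : Int) :
    (ks.foldl (fun (st : PySem.Dict (List String) Int × Int) x =>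
      (st.1.insert x (st.1.getD x 0 + 1), st.2 + st.1.getD x 0)) (PySem.Dict.empty, t)).2
    = t + pvAval ks := by
  induction ks using List.reverseRecOn generalizing t with
  | nil => simp [pvAval, PySem.Set.ofList]
  | append_singleton ks k ih =>
    rw [List.foldl_append, List.foldl_cons, List.foldl_nil]
    simp only
    rw [pvB_dict]
    have hget : (ks.foldl (fun d x => d.insert x (d.getD x 0 + 1)) PySem.Dict.empty).getD k 0
        = (ks.count k : Int) := by
      rw [PySem.Dict.getD_foldl_insert_add_one]
      simp [PySem.Dict.getD_empty]
    rw [ih, hget, pvAval_snoc]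
    ring

-- ===== VERDICT (by name: the statement is the Claim_ definition above) =====
theorem remaining_ambiguity_pairs_py_spec : Claim_equal_remaining_ambiguity_pairs_py := by
  intro neighborhoods selected_fields _
  unfold Spec_remaining_ambiguity_pairs_py remaining_ambiguity_pairs_py remaining_ambiguity_pairs_py_alt
  apply PySem.List.foldl_congr_mem
  intro total nb _
  simp only
  have hA := pvA_inner (nb.map (fun record => pvKey record selected_fields)) total
  have hB := pvB_inner (nb.map (fun record => pvKey record selected_fields)) total
  rw [List.foldl_map] at hA hB
  rw [hA, hB]
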